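-- pv_equiv track=rewrite | github.com/m2700/rust-mpi-tool-support | tool/mpi-tool-creator/type_convert/utility.py | iter_split
-- ===== SOURCE A (Python) =====
-- def iter_split(l, spl):
--     spl_itm = []
--     for itm in l:
--         if itm == spl:
--             yield spl_itm
--             spl_itm = []
--         else:
--             spl_itm.append(itm)
--     yield spl_itm
-- ===== SOURCE B (Python) =====
-- def iter_split(l, spl):
--     items = list(l)
--     seps = [i for i, x in enumerate(items) if x == spl]
--     start = 0
--     for i in seps:
--         yield items[start:i]
--         start = i + 1
--     yield items[start:]
-- ===== Notes on version B (the rewrite author's own statement) =====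
-- stated objective: alternative
-- what changed: B materialises the iterable, collects the separator positions with enumerate, and yields index-based slices between consecutive separators instead of streaming elements into a growing accumulator chunk.
import Mathlib
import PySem

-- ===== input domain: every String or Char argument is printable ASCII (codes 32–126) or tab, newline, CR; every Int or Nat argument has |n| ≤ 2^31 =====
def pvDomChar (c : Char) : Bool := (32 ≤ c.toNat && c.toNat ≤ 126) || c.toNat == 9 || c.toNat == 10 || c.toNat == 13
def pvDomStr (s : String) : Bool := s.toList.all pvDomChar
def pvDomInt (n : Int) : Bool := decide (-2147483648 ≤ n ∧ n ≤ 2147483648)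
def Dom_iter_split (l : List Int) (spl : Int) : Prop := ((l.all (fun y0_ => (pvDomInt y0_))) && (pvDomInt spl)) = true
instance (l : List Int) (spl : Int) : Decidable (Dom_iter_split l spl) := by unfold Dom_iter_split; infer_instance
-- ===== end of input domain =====

-- B collects separator positions with enumerate and yields index-based slices instead of
-- streaming elements into a growing accumulator chunk (alternative decomposition, same cost).
-- Both versions are generators; equivalence is about the yielded sequence as a list.

-- ===== PORT A =====
def iter_split (l : List Int) (spl : Int) : List (List Int) :=
  let st := l.foldl
    (fun (st : List (List Int) × List Int) itm =>
      if itm == spl then (st.1 ++ [st.2], [])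
      else (st.1, st.2 ++ [itm]))
    ([], [])
  st.1 ++ [st.2]

-- ===== PORT B =====
def iter_split_alt (l : List Int) (spl : Int) : List (List Int) :=
  let items := l
  let seps : List Int :=
    (PySem.List.enumerate items).filterMap (fun p => if p.2 == spl then some p.1 else none)
  let st := seps.foldl
    (fun (st : List (List Int) × Int) i =>
      (st.1 ++ [PySem.List.slice items (some st.2) (some i)], i + 1))
    ([], 0)
  st.1 ++ [PySem.List.slice items (some st.2) none]

-- ===== PRECONDITION & SPEC =====
def Spec_iter_split (l : List Int) (spl : Int) (out : List (List Int)) : Prop := out = iter_split_alt l spl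
instance (l : List Int) (spl : Int) (out : List (List Int)) : Decidable (Spec_iter_split l spl out) := by unfold Spec_iter_split; infer_instance

-- ===== CLAIM (what is proved, stated in full; the proofs are below) =====
def Claim_equal_iter_split : Prop := ∀ (l : List Int) (spl : Int), Dom_iter_split l spl → Spec_iter_split l spl (iter_split l spl)

-- ===== LEMMAS AND PROOFS =====

/-- Reference recursion: split a list on a separator, always a nonempty list of chunks. -/
def splitRec (spl : Int) : List Int → List (List Int)
  | [] => [[]]
  | x :: xs =>
    if x == spl then [] :: splitRec spl xs
    else
      match splitRec spl xs with
      | [] => [[x]]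
      | c :: cs => (x :: c) :: cs

/-- Prepend `cur` onto the first chunk. -/
def consHead (cur : List Int) : List (List Int) → List (List Int)
  | [] => [cur]
  | c :: cs => (cur ++ c) :: cs

lemma splitRec_ne_nil (spl : Int) (l : List Int) : splitRec spl l ≠ [] := by
  cases l with
  | nil => simp [splitRec]
  | cons x xs =>
    simp only [splitRec]
    split
    · simp
    · split
      · simp
      · simp

lemma consHead_nil_eq (spl : Int) (l : List Int) :
    consHead [] (splitRec spl l) = splitRec spl l := by
  cases h : splitRec spl l with
  | nil => exact absurd h (splitRec_ne_nil spl l)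
  | cons c cs => simp [consHead]

lemma loopA (spl : Int) (xs : List Int) : ∀ (out : List (List Int)) (cur : List Int),
    (let st := xs.foldl
        (fun (st : List (List Int) × List Int) itm =>
          if itm == spl then (st.1 ++ [st.2], [])
          else (st.1, st.2 ++ [itm]))
        (out, cur)
     st.1 ++ [st.2]) = out ++ consHead cur (splitRec spl xs) := by
  induction xs with
  | nil => intro out cur; simp [splitRec, consHead]
  | cons x xs ih =>
    intro out cur
    simp only [List.foldl_cons, splitRec]
    by_cases hx : x == spl
    · simp only [hx, if_true, ih]
      rw [consHead_nil_eq]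
      simp [consHead]
    · simp only [hx, if_false, ih, Bool.false_eq_true]
      cases h : splitRec spl xs with
      | nil => exact absurd h (splitRec_ne_nil spl xs)
      | cons c cs => simp [consHead]

lemma loopB (spl : Int) (xs : List Int) : ∀ (pre : List Int) (out : List (List Int)) (start : Nat),
    start ≤ pre.length →
    (let items := pre ++ xs
     let st := ((PySem.List.enumerate xs (pre.length : Int)).filterMap
          (fun p => if p.2 == spl then some p.1 else none)).foldl
        (fun (st : List (List Int) × Int) i =>
          (st.1 ++ [PySem.List.slice items (some st.2) (some i)], i + 1))
        (out, (start : Int))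
     st.1 ++ [PySem.List.slice items (some st.2) none]) =
    out ++ consHead (pre.drop start) (splitRec spl xs) := by
  induction xs with
  | nil =>
    intro pre out start hs
    simp [PySem.List.enumerate_nil, PySem.List.slice_from_natCast, consHead, splitRec]
  | cons x xs ih =>
    intro pre out start hs
    simp only [PySem.List.enumerate_cons, List.filterMap_cons]
    by_cases hx : x == spl
    · simp only [hx, if_true, List.foldl_cons]
      have h1 : ((pre.length : Int) + 1) = ((pre ++ [x]).length : Nat) := by
        simp
      have h2 : PySem.List.slice (pre ++ x :: xs) (some (start : Int)) (some (pre.length : Int))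
          = pre.drop start := by
        rw [PySem.List.slice_natCast]
        rw [List.drop_append_of_le_length hs]
        rw [List.take_left']
        simp
      have h3 : pre ++ x :: xs = (pre ++ [x]) ++ xs := by simp
      rw [h2, h1, h3]
      have := ih (pre ++ [x]) (out ++ [pre.drop start]) (pre ++ [x]).length (le_refl _)
      simp only at this
      rw [this]
      rw [List.drop_length]
      rw [consHead_nil_eq]
      simp [consHead, splitRec, hx]
    · simp only [hx, if_false, Bool.false_eq_true]
      have h1 : ((pre.length : Int) + 1) = (((pre ++ [x]).length : Nat) : Int) := by
        simp
      have h3 : pre ++ x :: xs = (pre ++ [x]) ++ xs := by simp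
      rw [h1, h3]
      have := ih (pre ++ [x]) out start (by simp; omega)
      simp only at this
      rw [this]
      have h4 : (pre ++ [x]).drop start = pre.drop start ++ [x] := by
        rw [List.drop_append_of_le_length hs]
      rw [h4]
      simp only [splitRec, hx, Bool.false_eq_true, if_false]
      cases h : splitRec spl xs with
      | nil => exact absurd h (splitRec_ne_nil spl xs)
      | cons c cs => simp [consHead]

lemma iter_split_eq_splitRec (l : List Int) (spl : Int) :
    iter_split l spl = splitRec spl l := by
  unfold iter_split
  have := loopA spl l [] []
  simp only at this
  rw [this]
  rw [consHead_nil_eq]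
  simp

lemma iter_split_alt_eq_splitRec (l : List Int) (spl : Int) :
    iter_split_alt l spl = splitRec spl l := by
  unfold iter_split_alt
  have := loopB spl l [] [] 0 (by simp)
  simp only [List.length_nil, Nat.cast_zero, List.nil_append, List.drop_nil] at this
  rw [this]
  rw [consHead_nil_eq]

-- ===== VERDICT (by name: the statement is the Claim_ definition above) =====
theorem iter_split_spec : Claim_equal_iter_split := by
  intro l spl _
  unfold Spec_iter_split
  rw [iter_split_eq_splitRec, iter_split_alt_eq_splitRec]
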